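-- pv_equiv track=rewrite | github.com/JihoeKwon/GeologyModel | SeoulData/seoul_geological_knowledge.py | get_contact_type
-- ===== SOURCE A (Python) =====
-- CONTACT_RULES = {
--     "conformable_pairs": [
--         ("PCEbngn", "PCEls"),   # 편마암-석회암: 협재
--         ("PCEbngn", "PCEqz"),   # 편마암-규암: 협재
--         ("PCEbngn", "PCEggn"),  # 편마암-화강암질편마암: 점이적
--         ("PCEbngn", "PCEam"),   # 편마암-각섬암: 조화적
--         ("PCEls", "PCEqz"),     # 석회암-규암: 모두 편마암 내 협재
--         ("PCEggn", "PCEam"),    # 화강암질편마암-각섬암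
--     ],
--
--     "intrusive_pairs": [
--         ("PCEbngn", "Pgr"),     # 편마암 ← 반상화강암 관입
--         ("PCEbngn", "Jbgr"),    # 편마암 ← 흑운모화강암 관입
--         ("PCEggn", "Jbgr"),     # 화강암질편마암 ← 흑운모화강암 관입
--         ("PCEbngn", "Kqv"),     # 편마암 ← 석영맥 관입
--         ("PCEbngn", "Kfl"),     # 편마암 ← 규장암맥 관입
--         ("PCEbngn", "Kqp"),     # 편마암 ← 석영반암 관입
--         ("PCEggn", "Kqv"),      # 화강암질편마암 ← 석영맥 관입
--         ("Jbgr", "Kqv"),        # 흑운모화강암 ← 석영맥 관입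
--         ("Jbgr", "Kfl"),        # 흑운모화강암 ← 규장암맥 관입
--     ],
--
--     "unconformable_pairs": [
--         ("PCEbngn", "Qa"),      # 모든 암석 위 충적층 부정합
--         ("PCEggn", "Qa"),
--         ("PCEls", "Qa"),
--         ("Pgr", "Qa"),
--         ("Jbgr", "Qa"),
--         ("Kqv", "Qa"),
--         ("Kfl", "Qa"),
--     ]
-- }
--
-- def get_contact_type(rock1: str, rock2: str) -> str:
--     """
--     두 암석 사이의 접촉 유형을 반환합니다.
--
--     Returns:
--         "conformable", "intrusive", "unconformable", or "unknown"
--     """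
--     pair = tuple(sorted([rock1, rock2]))
--
--     # Check conformable
--     for p in CONTACT_RULES["conformable_pairs"]:
--         if tuple(sorted(p)) == pair:
--             return "conformable"
--
--     # Check intrusive
--     for p in CONTACT_RULES["intrusive_pairs"]:
--         if tuple(sorted(p)) == pair:
--             return "intrusive"
--
--     # Check unconformable
--     for p in CONTACT_RULES["unconformable_pairs"]:
--         if tuple(sorted(p)) == pair:
--             return "unconformable"
--
--     return "unknown"
-- ===== SOURCE B (Python) =====
-- # Rule-based classification: instead of scanning pair lists, decide the contact type
-- # from the geological relations directly (unconformity with Qa, host<-intruder relation,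
-- # conformity within the Precambrian metamorphic suite), using unordered membership tests.
--
-- def get_contact_type(rock1: str, rock2: str) -> str:
--     """
--     두 암석 사이의 접촉 유형을 반환합니다.
--
--     Returns:
--         "conformable", "intrusive", "unconformable", or "unknown"
--     """
--     if rock1 == rock2:
--         return "unknown"
--
--     def has(code):
--         return rock1 == code or rock2 == code
--
--     def any_of(codes):
--         return rock1 in codes or rock2 in codes
--
--     # Quaternary alluvium rests unconformably on every mapped unit it touches.
--     if has("Qa"):
--         if any_of(("PCEbngn", "PCEggn", "PCEls", "Pgr", "Jbgr", "Kqv", "Kfl")):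
--             return "unconformable"
--         return "unknown"
--
--     # Younger igneous bodies intrude their recorded hosts.
--     if (has("PCEbngn") and any_of(("Pgr", "Jbgr", "Kqv", "Kfl", "Kqp"))) \
--             or (has("PCEggn") and any_of(("Jbgr", "Kqv"))) \
--             or (has("Jbgr") and any_of(("Kqv", "Kfl"))):
--         return "intrusive"
--
--     # Within the Precambrian metamorphic suite: the banded gneiss is conformable with
--     # every other member; besides that only limestone-quartzite and
--     # granitic gneiss-amphibolite are conformable.
--     if (has("PCEbngn") and any_of(("PCEls", "PCEqz", "PCEggn", "PCEam"))) \
--             or (has("PCEls") and has("PCEqz")) \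
--             or (has("PCEggn") and has("PCEam")):
--         return "conformable"
--
--     return "unknown"
-- ===== Notes on version B (the rewrite author's own statement) =====
-- stated objective: simpler
-- what changed: Replaced A's sort-the-pair-then-scan over three rule-pair lists with a direct rule-based decision procedure: an equal-codes guard and three unordered membership tests encoding the geological relations (Qa unconformity over the listed units, host/intruder pairs, conformity of the banded gneiss within the Precambrian suite plus the two extra conformable pairs); no sorting, no pair lists, no table.
import Mathlib
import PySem

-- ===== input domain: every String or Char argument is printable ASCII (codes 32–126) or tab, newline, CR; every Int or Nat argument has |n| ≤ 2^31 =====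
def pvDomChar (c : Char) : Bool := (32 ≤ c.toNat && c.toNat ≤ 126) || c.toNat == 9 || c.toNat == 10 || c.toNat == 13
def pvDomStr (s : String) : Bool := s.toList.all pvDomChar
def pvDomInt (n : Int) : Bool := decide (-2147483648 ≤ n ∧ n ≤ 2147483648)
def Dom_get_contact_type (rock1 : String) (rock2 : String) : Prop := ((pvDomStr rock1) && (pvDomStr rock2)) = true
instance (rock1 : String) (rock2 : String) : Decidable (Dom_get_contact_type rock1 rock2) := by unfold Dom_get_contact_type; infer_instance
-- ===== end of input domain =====

-- B replaces A's three scans over rule-pair lists (re-sorting every rule pair per call) with a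
-- direct rule-based decision: unordered membership tests on the two codes (Qa unconformity,
-- host/intruder relation, Precambrian conformity); objective: simpler, no sorting, no list scans.


-- ===== PORT A =====
-- CONTACT_RULES: the three lists, in source order
def conformablePairs : List (String × String) :=
  [("PCEbngn", "PCEls"), ("PCEbngn", "PCEqz"), ("PCEbngn", "PCEggn"),
   ("PCEbngn", "PCEam"), ("PCEls", "PCEqz"), ("PCEggn", "PCEam")]

def intrusivePairs : List (String × String) :=
  [("PCEbngn", "Pgr"), ("PCEbngn", "Jbgr"), ("PCEggn", "Jbgr"),
   ("PCEbngn", "Kqv"), ("PCEbngn", "Kfl"), ("PCEbngn", "Kqp"),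
   ("PCEggn", "Kqv"), ("Jbgr", "Kqv"), ("Jbgr", "Kfl")]

def unconformablePairs : List (String × String) :=
  [("PCEbngn", "Qa"), ("PCEggn", "Qa"), ("PCEls", "Qa"), ("Pgr", "Qa"),
   ("Jbgr", "Qa"), ("Kqv", "Qa"), ("Kfl", "Qa")]

-- tuple(sorted([a, b])): PySem's Python-exact stable sort, then the 2-tuple. Python's str '<'
-- is code-point lexicographic = Lean's '<' on toList (PYSEM 'str COMPARISON'); the key is toList
-- so the comparison is kernel-reducible. The catch-all branch is unreachable (sorted keeps length 2).
def sortPair (a : String) (b : String) : String × String :=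
  match PySem.List.sorted [a, b] (fun x => x.toList) false with
  | [x, y] => (x, y)
  | _ => (a, b)

-- literal port of A: pair = tuple(sorted([rock1, rock2])); three for-loops with early return, in order
def get_contact_type (rock1 : String) (rock2 : String) : String :=
  let pair := sortPair rock1 rock2
  if conformablePairs.any (fun p => sortPair p.1 p.2 == pair) then "conformable"
  else if intrusivePairs.any (fun p => sortPair p.1 p.2 == pair) then "intrusive"
  else if unconformablePairs.any (fun p => sortPair p.1 p.2 == pair) then "unconformable"
  else "unknown"

-- ===== PORT B =====
-- literal port of Source B: equal-codes guard, then three unordered rule tests.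
-- has c = "c in (rock1, rock2)"; anyOf cs = "rock1 in cs or rock2 in cs".
def get_contact_type_alt (rock1 : String) (rock2 : String) : String :=
  if rock1 == rock2 then "unknown"
  else
    let has := fun (c : String) => rock1 == c || rock2 == c
    let anyOf := fun (cs : List String) => cs.contains rock1 || cs.contains rock2
    if has "Qa" then
      if anyOf ["PCEbngn", "PCEggn", "PCEls", "Pgr", "Jbgr", "Kqv", "Kfl"] then "unconformable"
      else "unknown"
    else if (has "PCEbngn" && anyOf ["Pgr", "Jbgr", "Kqv", "Kfl", "Kqp"]) ||
            (has "PCEggn" && anyOf ["Jbgr", "Kqv"]) ||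
            (has "Jbgr" && anyOf ["Kqv", "Kfl"]) then "intrusive"
    else if (has "PCEbngn" && anyOf ["PCEls", "PCEqz", "PCEggn", "PCEam"]) ||
            (has "PCEls" && has "PCEqz") ||
            (has "PCEggn" && has "PCEam") then "conformable"
    else "unknown"

-- ===== PRECONDITION & SPEC =====
def Spec_get_contact_type (rock1 : String) (rock2 : String) (out : String) : Prop := out = get_contact_type_alt rock1 rock2
instance (rock1 : String) (rock2 : String) (out : String) : Decidable (Spec_get_contact_type rock1 rock2 out) := by unfold Spec_get_contact_type; infer_instance

-- ===== CLAIM (what is proved, stated in full; the proofs are below) =====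
def Claim_equal_get_contact_type : Prop := ∀ (rock1 : String) (rock2 : String), Dom_get_contact_type rock1 rock2 → Spec_get_contact_type rock1 rock2 (get_contact_type rock1 rock2)

-- ===== LEMMAS AND PROOFS =====
-- the eleven rock codes either program ever mentions
def theCodes : List String :=
  ["PCEbngn", "PCEggn", "PCEls", "PCEqz", "PCEam", "Pgr", "Jbgr", "Kqv", "Kfl", "Kqp", "Qa"]

-- sorted of a two-element list is one of its two arrangements
theorem sortPair_cases (a b : String) : sortPair a b = (a, b) ∨ sortPair a b = (b, a) := by
  unfold sortPair
  rw [PySem.List.sorted_eq_foldl_insertBy]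
  by_cases h : b.toList < a.toList <;>
    simp [List.foldl, PySem.List.insertBy, h]

-- the 22 rule pairs, sorted (concrete evaluations used by the symbolic cases below)
theorem sp0 : sortPair "PCEbngn" "PCEls" = ("PCEbngn", "PCEls") := by decide
theorem sp1 : sortPair "PCEbngn" "PCEqz" = ("PCEbngn", "PCEqz") := by decide
theorem sp2 : sortPair "PCEbngn" "PCEggn" = ("PCEbngn", "PCEggn") := by decide
theorem sp3 : sortPair "PCEbngn" "PCEam" = ("PCEam", "PCEbngn") := by decide
theorem sp4 : sortPair "PCEls" "PCEqz" = ("PCEls", "PCEqz") := by decide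
theorem sp5 : sortPair "PCEggn" "PCEam" = ("PCEam", "PCEggn") := by decide
theorem sp6 : sortPair "PCEbngn" "Pgr" = ("PCEbngn", "Pgr") := by decide
theorem sp7 : sortPair "PCEbngn" "Jbgr" = ("Jbgr", "PCEbngn") := by decide
theorem sp8 : sortPair "PCEggn" "Jbgr" = ("Jbgr", "PCEggn") := by decide
theorem sp9 : sortPair "PCEbngn" "Kqv" = ("Kqv", "PCEbngn") := by decide
theorem sp10 : sortPair "PCEbngn" "Kfl" = ("Kfl", "PCEbngn") := by decide
theorem sp11 : sortPair "PCEbngn" "Kqp" = ("Kqp", "PCEbngn") := by decide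
theorem sp12 : sortPair "PCEggn" "Kqv" = ("Kqv", "PCEggn") := by decide
theorem sp13 : sortPair "Jbgr" "Kqv" = ("Jbgr", "Kqv") := by decide
theorem sp14 : sortPair "Jbgr" "Kfl" = ("Jbgr", "Kfl") := by decide
theorem sp15 : sortPair "PCEbngn" "Qa" = ("PCEbngn", "Qa") := by decide
theorem sp16 : sortPair "PCEggn" "Qa" = ("PCEggn", "Qa") := by decide
theorem sp17 : sortPair "PCEls" "Qa" = ("PCEls", "Qa") := by decide
theorem sp18 : sortPair "Pgr" "Qa" = ("Pgr", "Qa") := by decide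
theorem sp19 : sortPair "Jbgr" "Qa" = ("Jbgr", "Qa") := by decide
theorem sp20 : sortPair "Kqv" "Qa" = ("Kqv", "Qa") := by decide
theorem sp21 : sortPair "Kfl" "Qa" = ("Kfl", "Qa") := by decide

set_option maxHeartbeats 4000000 in
set_option maxRecDepth 4000 in
theorem main_eq (rock1 rock2 : String) :
    get_contact_type rock1 rock2 = get_contact_type_alt rock1 rock2 := by
  by_cases h1 : rock1 ∈ theCodes
  · by_cases h2 : rock2 ∈ theCodes
    · fin_cases h1 <;> fin_cases h2 <;> decide
    · simp only [theCodes, List.mem_cons, List.not_mem_nil, or_false, not_or] at h2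
      obtain ⟨n1, n2, n3, n4, n5, n6, n7, n8, n9, n10, n11⟩ := h2
      rcases sortPair_cases rock1 rock2 with h | h <;> fin_cases h1 <;>
        simp [get_contact_type, get_contact_type_alt, conformablePairs,
          intrusivePairs, unconformablePairs, h, sp0, sp1, sp2, sp3, sp4, sp5, sp6, sp7, sp8, sp9, sp10, sp11, sp12, sp13, sp14, sp15, sp16, sp17, sp18, sp19, sp20, sp21,
          n1, n2, n3, n4, n5, n6, n7, n8, n9, n10, n11,
          Ne.symm n1, Ne.symm n2, Ne.symm n3, Ne.symm n4, Ne.symm n5, Ne.symm n6,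
          Ne.symm n7, Ne.symm n8, Ne.symm n9, Ne.symm n10, Ne.symm n11]
  · simp only [theCodes, List.mem_cons, List.not_mem_nil, or_false, not_or] at h1
    obtain ⟨n1, n2, n3, n4, n5, n6, n7, n8, n9, n10, n11⟩ := h1
    by_cases h2 : rock2 ∈ theCodes
    · rcases sortPair_cases rock1 rock2 with h | h <;> fin_cases h2 <;>
        simp [get_contact_type, get_contact_type_alt, conformablePairs,
          intrusivePairs, unconformablePairs, h, sp0, sp1, sp2, sp3, sp4, sp5, sp6, sp7, sp8, sp9, sp10, sp11, sp12, sp13, sp14, sp15, sp16, sp17, sp18, sp19, sp20, sp21,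
          n1, n2, n3, n4, n5, n6, n7, n8, n9, n10, n11,
          Ne.symm n1, Ne.symm n2, Ne.symm n3, Ne.symm n4, Ne.symm n5, Ne.symm n6,
          Ne.symm n7, Ne.symm n8, Ne.symm n9, Ne.symm n10, Ne.symm n11]
    · simp only [theCodes, List.mem_cons, List.not_mem_nil, or_false, not_or] at h2
      obtain ⟨m1, m2, m3, m4, m5, m6, m7, m8, m9, m10, m11⟩ := h2
      rcases sortPair_cases rock1 rock2 with h | h <;>
        simp [get_contact_type, get_contact_type_alt, conformablePairs,
          intrusivePairs, unconformablePairs, h, sp0, sp1, sp2, sp3, sp4, sp5, sp6, sp7, sp8, sp9, sp10, sp11, sp12, sp13, sp14, sp15, sp16, sp17, sp18, sp19, sp20, sp21,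
          n1, n2, n3, n4, n5, n6, n7, n8, n9, n10, n11,
          m1, m2, m3, m4, m5, m6, m7, m8, m9, m10, m11,
          Ne.symm n1, Ne.symm n2, Ne.symm n3, Ne.symm n4, Ne.symm n5, Ne.symm n6,
          Ne.symm n7, Ne.symm n8, Ne.symm n9, Ne.symm n10, Ne.symm n11,
          Ne.symm m1, Ne.symm m2, Ne.symm m3, Ne.symm m4, Ne.symm m5, Ne.symm m6,
          Ne.symm m7, Ne.symm m8, Ne.symm m9, Ne.symm m10, Ne.symm m11]

-- ===== VERDICT (by name: the statement is the Claim_ definition above) =====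
theorem get_contact_type_spec : Claim_equal_get_contact_type := by
  intro rock1 rock2 _
  unfold Spec_get_contact_type
  exact main_eq rock1 rock2
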